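-- pv_equiv track=rewrite | github.com/klavuzadam/devamkee | Ameria2/root/uitooltip.py | SplitDescription
-- ===== SOURCE A (Python) =====
-- def SplitDescription(desc, limit):
-- 	total_tokens = desc.split()
-- 	line_tokens = []
-- 	line_len = 0
-- 	lines = []
-- 	for token in total_tokens:
-- 		if "@" in token:
-- 			sep_pos = token.find("@")
-- 			line_tokens.append(token[:sep_pos])
--
-- 			lines.append(" ".join(line_tokens))
-- 			line_len = len(token) - (sep_pos + 1)
-- 			line_tokens = [token[sep_pos+1:]]
-- 		else:
-- 			line_len += len(token)
-- 			if len(line_tokens) + line_len > limit: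
-- 				lines.append(" ".join(line_tokens))
-- 				line_len = len(token)
-- 				line_tokens = [token]
-- 			else:
-- 				line_tokens.append(token)
--
-- 	if line_tokens:
-- 		lines.append(" ".join(line_tokens))
--
-- 	return lines
-- ===== SOURCE B (Python) =====
-- def SplitDescription(desc, limit):
--     # stage 1: cut the token stream at '@' tokens into plain-token runs and separators
--     runs, seps, cur = [], [], []
--     for t in desc.split():
--         if "@" in t:
--             i = t.find("@")
--             runs.append(cur)
--             seps.append((t[:i], t[i + 1:]))
--             cur = []
--         else:
--             cur.append(t)
--
--     # stage 2: greedy-wrap each run; a separator closes the line with its prefix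
--     # and seeds the next line with its suffix
--     def wrap(line, run):
--         closed = []
--         for t in run:
--             if len(" ".join(line + [t])) > limit:
--                 closed.append(" ".join(line))
--                 line = [t]
--             else:
--                 line = line + [t]
--         return closed, line
--
--     lines, line = [], []
--     for run, (prefix, suffix) in zip(runs, seps):
--         closed, line = wrap(line, run)
--         lines += closed
--         lines.append(" ".join(line + [prefix]))
--         line = [suffix]
--     closed, line = wrap(line, cur)
--     lines += closed
--     if line:
--         lines.append(" ".join(line))
--     return lines
-- ===== Notes on version B (the rewrite author's own statement) =====
-- stated objective: alternative
-- what changed: B replaces A's single stateful pass (token list + running length counter) with two staged passes: first it cuts the token stream at '@' tokens into plain runs and (prefix,suffix) separators, then a wrap helper greedily wraps each run, separators closing one line and seeding the next.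
import Mathlib
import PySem

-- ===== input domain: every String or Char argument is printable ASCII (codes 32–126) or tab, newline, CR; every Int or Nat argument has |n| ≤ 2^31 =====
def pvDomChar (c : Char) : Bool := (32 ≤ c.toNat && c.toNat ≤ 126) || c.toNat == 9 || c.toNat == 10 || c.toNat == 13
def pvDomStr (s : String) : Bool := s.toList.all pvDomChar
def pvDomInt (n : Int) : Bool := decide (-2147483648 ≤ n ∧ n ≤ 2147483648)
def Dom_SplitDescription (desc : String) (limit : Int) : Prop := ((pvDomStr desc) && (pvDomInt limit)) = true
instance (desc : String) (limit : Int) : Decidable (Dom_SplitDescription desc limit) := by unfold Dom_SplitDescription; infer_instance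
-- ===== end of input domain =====

-- B replaces A's single stateful pass (token list + running-length counter) by two staged
-- passes: cut the token stream at '@' tokens into plain runs and (prefix,suffix) separators,
-- then greedily wrap each run; objective: alternative. Both programs are total.

-- ===== PORT A =====
-- loop body of A's 'for token in total_tokens' (state: line_tokens, line_len, lines)
def pvStepA (limit : Int) (st : List String × Int × List String) (token : String) :
    List String × Int × List String :=
  let lineTokens := st.1
  let lineLen := st.2.1
  let lines := st.2.2
  if PySem.Str.isIn "@" token then
    let sepPos := PySem.Str.find token "@"
    let lineTokens' := lineTokens ++ [PySem.Str.slice token none (some sepPos)]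
    ([PySem.Str.slice token (some (sepPos + 1)) none],
     PySem.Str.len token - (sepPos + 1),
     lines ++ [PySem.Str.join " " lineTokens'])
  else
    let lineLen' := lineLen + PySem.Str.len token
    if (lineTokens.length : Int) + lineLen' > limit then
      ([token], PySem.Str.len token, lines ++ [PySem.Str.join " " lineTokens])
    else
      (lineTokens ++ [token], lineLen', lines)

def SplitDescription (desc : String) (limit : Int) : List String :=
  let st := (PySem.Str.split₀ desc).foldl (pvStepA limit) ([], 0, [])
  if st.1 ≠ [] then st.2.2 ++ [PySem.Str.join " " st.1] else st.2.2

-- ===== PORT B =====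
-- stage-1 loop body: cut tokens at '@' into (runs, seps, cur)
def pvSeg (st : List (List String) × List (String × String) × List String) (t : String) :
    List (List String) × List (String × String) × List String :=
  if PySem.Str.isIn "@" t then
    let i := PySem.Str.find t "@"
    (st.1 ++ [st.2.2],
     st.2.1 ++ [(PySem.Str.slice t none (some i), PySem.Str.slice t (some (i + 1)) none)],
     [])
  else (st.1, st.2.1, st.2.2 ++ [t])

-- loop body of B's wrap helper (state: closed lines, open line tokens)
def pvWrapStep (limit : Int) (st : List String × List String) (t : String) :
    List String × List String :=
  if PySem.Str.len (PySem.Str.join " " (st.2 ++ [t])) > limit then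
    (st.1 ++ [PySem.Str.join " " st.2], [t])
  else (st.1, st.2 ++ [t])

-- B's wrap(line, run): returns (closed lines, open line)
def pvWrap (limit : Int) (line : List String) (run : List String) : List String × List String :=
  run.foldl (pvWrapStep limit) ([], line)

-- stage-2 loop body over zip(runs, seps) (state: lines, open line)
def pvStep2 (limit : Int) (st : List String × List String) (rp : List String × String × String) :
    List String × List String :=
  let w := pvWrap limit st.2 rp.1
  (st.1 ++ w.1 ++ [PySem.Str.join " " (w.2 ++ [rp.2.1])], [rp.2.2])

def SplitDescription_alt (desc : String) (limit : Int) : List String :=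
  let st := (PySem.Str.split₀ desc).foldl pvSeg ([], [], [])
  let st2 := (st.1.zip st.2.1).foldl (pvStep2 limit) ([], [])
  let w := pvWrap limit st2.2 st.2.2
  let lines := st2.1 ++ w.1
  if w.2 ≠ [] then lines ++ [PySem.Str.join " " w.2] else lines

-- ===== PRECONDITION & SPEC =====
def Spec_SplitDescription (desc : String) (limit : Int) (out : List String) : Prop := out = SplitDescription_alt desc limit
instance (desc : String) (limit : Int) (out : List String) : Decidable (Spec_SplitDescription desc limit out) := by unfold Spec_SplitDescription; infer_instance

-- ===== CLAIM (what is proved, stated in full; the proofs are below) =====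
def Claim_equal_SplitDescription : Prop := ∀ (desc : String) (limit : Int), Dom_SplitDescription desc limit → Spec_SplitDescription desc limit (SplitDescription desc limit)

-- ===== LEMMAS AND PROOFS =====

theorem pvJoinSingleton (t : String) : PySem.Str.join " " [t] = t := by
  apply String.toList_inj.mp
  simp [PySem.Str.toList_join, PySem.Chars.join_singleton]

-- length of a nonempty joined line = sum of token lengths + (token count - 1)
theorem pvLenJoin (lt : List String) (h : lt ≠ []) :
    PySem.Str.len (PySem.Str.join " " lt) = (lt.map PySem.Str.len).sum + lt.length - 1 := by
  induction lt with
  | nil => simp at h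
  | cons x xs ih =>
    cases xs with
    | nil =>
      simp [pvJoinSingleton]
    | cons y ys =>
      have hj : PySem.Str.join " " (x :: y :: ys) = x ++ " " ++ PySem.Str.join " " (y :: ys) := by
        apply String.toList_inj.mp
        simp [PySem.Str.toList_join, PySem.Chars.join_cons_cons, String.toList_append]
      rw [hj, PySem.Str.len_append, PySem.Str.len_append, ih (by simp)]
      have h1 : PySem.Str.len " " = 1 := by decide
      rw [h1]
      simp only [List.map_cons, List.sum_cons, List.length_cons]
      push_cast
      ring

-- length of the joined snoc line, with no subtraction
theorem pvLenJoinSnoc (lt : List String) (t : String) :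
    PySem.Str.len (PySem.Str.join " " (lt ++ [t])) =
      (lt.length : Int) + ((lt.map PySem.Str.len).sum + PySem.Str.len t) := by
  rw [pvLenJoin (lt ++ [t]) (by simp)]
  simp only [List.map_append, List.map_cons, List.map_nil, List.sum_append, List.sum_cons,
    List.sum_nil, add_zero, List.length_append, List.length_cons, List.length_nil]
  push_cast
  ring

-- length of token[find(token,'@')+1:] when '@' is in token
theorem pvLenSuffix (t : String) (h : PySem.Str.isIn "@" t = true) :
    (t.length : Int) - (PySem.Chars.find t.toList ['@'] + 1) =
      ((PySem.List.slice t.toList (some (PySem.Chars.find t.toList ['@'] + 1))).length : Int) := by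
  have hinf : ['@'] <:+: t.toList := by
    have := (PySem.Str.isIn_iff_infix "@" t).mp h
    simpa using this
  have hnn : 0 ≤ PySem.Chars.find t.toList ['@'] :=
    (PySem.Chars.find_nonneg_iff _ _).mpr hinf
  have hsp := (PySem.Chars.find_spec hnn).1.length_le
  rw [List.length_drop] at hsp
  simp only [List.length_cons, List.length_nil] at hsp
  have hlen : t.toList.length = t.length := by simp
  rw [PySem.List.slice_from _ (by omega), List.length_drop]
  omega

-- the common recursive specification both programs compute
def pvSpec (limit : Int) : List String → List String → List String
  | [], line => if line = [] then [] else [PySem.Str.join " " line]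
  | t :: ts, line =>
    if PySem.Str.isIn "@" t then
      PySem.Str.join " " (line ++ [PySem.Str.slice t none (some (PySem.Str.find t "@"))]) ::
        pvSpec limit ts [PySem.Str.slice t (some (PySem.Str.find t "@" + 1)) none]
    else if PySem.Str.len (PySem.Str.join " " (line ++ [t])) > limit then
      PySem.Str.join " " line :: pvSpec limit ts [t]
    else pvSpec limit ts (line ++ [t])

-- finishing step of A (the final flush)
def pvAFin (st : List String × Int × List String) : List String :=
  st.2.2 ++ (if st.1 = [] then [] else [PySem.Str.join " " st.1])

-- finishing step of B (stage 2 + final wrap + flush), for an arbitrary entering line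
def pvBFin (limit : Int) (st : List (List String) × List (String × String) × List String)
    (L : List String) : List String :=
  let st2 := (st.1.zip st.2.1).foldl (pvStep2 limit) ([], L)
  let w := pvWrap limit st2.2 st.2.2
  st2.1 ++ w.1 ++ (if w.2 = [] then [] else [PySem.Str.join " " w.2])

-- ---- accumulator-factoring lemmas ----

theorem pvSeg_factor (ts : List String) (R : List (List String)) (S : List (String × String))
    (c : List String) :
    ts.foldl pvSeg (R, S, c) =
      (R ++ (ts.foldl pvSeg ([], [], c)).1,
       S ++ (ts.foldl pvSeg ([], [], c)).2.1,
       (ts.foldl pvSeg ([], [], c)).2.2) := by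
  induction ts generalizing R S c with
  | nil => simp
  | cons t ts ih =>
    by_cases h : PySem.Str.isIn "@" t = true
    · simp only [List.foldl_cons, pvSeg, h, if_true, List.nil_append]
      rw [ih, ih [c]]
      simp [List.append_assoc]
    · have h' : PySem.Str.isIn "@" t = false := by simpa using h
      simp only [List.foldl_cons, pvSeg, h', Bool.false_eq_true, if_false]
      exact ih R S (c ++ [t])

theorem pvWrap_factor (limit : Int) (run : List String) (C L : List String) :
    run.foldl (pvWrapStep limit) (C, L) =
      (C ++ (pvWrap limit L run).1, (pvWrap limit L run).2) := by
  induction run generalizing C L with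
  | nil => simp [pvWrap]
  | cons t run ih =>
    simp only [pvWrap, List.foldl_cons, pvWrapStep]
    by_cases h : PySem.Str.len (PySem.Str.join " " (L ++ [t])) > limit
    · simp only [if_pos h, List.nil_append]
      rw [ih, ih [PySem.Str.join " " L]]
      simp [List.append_assoc]
    · simp only [if_neg h]
      exact ih C (L ++ [t])

theorem pvStep2_factor (limit : Int) (zs : List (List String × String × String))
    (Ls : List String) (L : List String) :
    zs.foldl (pvStep2 limit) (Ls, L) =
      (Ls ++ (zs.foldl (pvStep2 limit) ([], L)).1, (zs.foldl (pvStep2 limit) ([], L)).2) := by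
  induction zs generalizing Ls L with
  | nil => simp
  | cons z zs ih =>
    simp only [List.foldl_cons, pvStep2]
    rw [ih, ih (([] : List String) ++ _ ++ _)]
    simp [List.append_assoc]

-- ---- wrap computes the spec on a run of plain tokens ----

theorem pvWrap_spec (limit : Int) (run : List String) (rest L : List String)
    (h : ∀ t ∈ run, PySem.Str.isIn "@" t = false) :
    pvSpec limit (run ++ rest) L =
      (pvWrap limit L run).1 ++ pvSpec limit rest (pvWrap limit L run).2 := by
  induction run generalizing L with
  | nil => simp [pvWrap]
  | cons t run ih =>
    have ht : PySem.Str.isIn "@" t = false := h t (by simp)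
    have hrun : ∀ u ∈ run, PySem.Str.isIn "@" u = false := fun u hu => h u (by simp [hu])
    simp only [List.cons_append, pvSpec, ht, Bool.false_eq_true, if_false]
    have hw : pvWrap limit L (t :: run) =
        run.foldl (pvWrapStep limit) (pvWrapStep limit ([], L) t) := rfl
    by_cases hc : PySem.Str.len (PySem.Str.join " " (L ++ [t])) > limit
    · simp only [if_pos hc]
      rw [ih [t] hrun, hw]
      simp only [pvWrapStep, if_pos hc, List.nil_append]
      rw [pvWrap_factor]
      simp
    · simp only [if_neg hc]
      rw [ih (L ++ [t]) hrun, hw]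
      simp only [pvWrapStep, if_neg hc]
      rfl

-- ---- A computes the spec ----

theorem pvA_spec (limit : Int) (ts : List String) (lt : List String) (ll : Int)
    (ls : List String) (h : ll = (lt.map PySem.Str.len).sum) :
    pvAFin (ts.foldl (pvStepA limit) (lt, ll, ls)) = ls ++ pvSpec limit ts lt := by
  induction ts generalizing lt ll ls with
  | nil =>
    simp [pvAFin, pvSpec]
  | cons t ts ih =>
    by_cases hat : PySem.Str.isIn "@" t = true
    · have hlen : PySem.Str.len t - (PySem.Str.find t "@" + 1) =
          ([PySem.Str.slice t (some (PySem.Str.find t "@" + 1)) none].map PySem.Str.len).sum := by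
        simp only [List.map_cons, List.map_nil, List.sum_cons, List.sum_nil, add_zero,
          PySem.Str.len_eq, PySem.Str.find_eq, PySem.Str.toList_slice,
          PySem.Chars.slice_eq_listSlice]
        simpa using pvLenSuffix t hat
      simp only [List.foldl_cons, pvStepA, hat, if_true, pvSpec]
      rw [ih _ _ _ hlen]
      simp [List.append_assoc]
    · have hat' : PySem.Str.isIn "@" t = false := by simpa using hat
      simp only [List.foldl_cons, pvStepA, hat', Bool.false_eq_true, if_false, pvSpec]
      have hcond : ((lt.length : Int) + (ll + PySem.Str.len t) > limit) ↔
          (PySem.Str.len (PySem.Str.join " " (lt ++ [t])) > limit) := by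
        rw [pvLenJoinSnoc, h]
      by_cases hov : (lt.length : Int) + (ll + PySem.Str.len t) > limit
      · simp only [if_pos hov, if_pos (hcond.mp hov)]
        rw [ih [t] _ _ (by simp)]
        simp [List.append_assoc]
      · simp only [if_neg hov, if_neg (fun hx => hov (hcond.mpr hx))]
        rw [ih (lt ++ [t]) _ _ (by simp [h])]

-- ---- B computes the spec ----

theorem pvB_spec (limit : Int) (ts : List String) (c : List String) (L : List String)
    (hc : ∀ t ∈ c, PySem.Str.isIn "@" t = false) :
    pvBFin limit (ts.foldl pvSeg ([], [], c)) L = pvSpec limit (c ++ ts) L := by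
  induction ts generalizing c L with
  | nil =>
    simp only [List.foldl_nil, pvBFin, List.zip_nil_left, List.nil_append, List.append_nil]
    have h2 := pvWrap_spec limit c [] L hc
    simp only [List.append_nil] at h2
    rw [h2]
    simp [pvSpec]
  | cons t ts ih =>
    by_cases hat : PySem.Str.isIn "@" t = true
    · simp only [List.foldl_cons, pvSeg, hat, if_true, List.nil_append]
      rw [pvSeg_factor ts [c]]
      set V := ts.foldl pvSeg ([], [], ([] : List String)) with hV
      set p := PySem.Str.slice t none (some (PySem.Str.find t "@")) with hp
      set s := PySem.Str.slice t (some (PySem.Str.find t "@" + 1)) none with hs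
      have hzip : (([c] ++ V.1).zip ([(p, s)] ++ V.2.1)) = (c, p, s) :: V.1.zip V.2.1 := rfl
      simp only [pvBFin, hzip, List.foldl_cons]
      have hstep : pvStep2 limit ([], L) (c, p, s) =
          ((pvWrap limit L c).1 ++ [PySem.Str.join " " ((pvWrap limit L c).2 ++ [p])], [s]) := by
        simp [pvStep2]
      rw [hstep, pvStep2_factor]
      have hB := ih [] [s] (by simp)
      simp only [pvBFin, List.nil_append] at hB
      rw [pvWrap_spec limit c (t :: ts) L hc]
      simp only [pvSpec, hat, if_true, ← hp, ← hs]
      rw [← hB]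
      simp only [hV]
      simp [List.append_assoc]
    · have hat' : PySem.Str.isIn "@" t = false := by simpa using hat
      simp only [List.foldl_cons, pvSeg, hat', Bool.false_eq_true, if_false]
      rw [ih (c ++ [t]) L ?_]
      · simp
      · intro u hu
        rcases List.mem_append.mp hu with h1 | h1
        · exact hc u h1
        · simpa [List.mem_singleton.mp h1] using hat'

-- ===== VERDICT (by name: the statement is the Claim_ definition above) =====
theorem SplitDescription_spec : Claim_equal_SplitDescription := by
  intro desc limit _
  unfold Spec_SplitDescription
  have hA : SplitDescription desc limit =
      pvAFin ((PySem.Str.split₀ desc).foldl (pvStepA limit) ([], 0, [])) := by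
    unfold SplitDescription pvAFin
    by_cases h : ((PySem.Str.split₀ desc).foldl (pvStepA limit) ([], 0, [])).1 = [] <;> simp [h]
  have hB : SplitDescription_alt desc limit =
      pvBFin limit ((PySem.Str.split₀ desc).foldl pvSeg ([], [], [])) [] := by
    unfold SplitDescription_alt pvBFin
    by_cases h : (pvWrap limit
        (((((PySem.Str.split₀ desc).foldl pvSeg ([], [], [])).1.zip
          ((PySem.Str.split₀ desc).foldl pvSeg ([], [], [])).2.1).foldl (pvStep2 limit) ([], [])).2)
        (((PySem.Str.split₀ desc).foldl pvSeg ([], [], [])).2.2)).2 = [] <;>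
      simp [h, List.append_assoc]
  rw [hA, hB, pvA_spec limit _ [] 0 [] (by simp), pvB_spec limit _ [] [] (by simp)]
  simp
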